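-- pv_equiv track=rewrite | github.com/mitchellgoffpc/lakitu | lakitu/datasets/vidindex.py | get_av1_info
-- ===== SOURCE A (Python) =====
-- from enum import Enum, IntEnum
--
-- class AV1OBUType(IntEnum):
--     RESERVED_0 = 0
--     SEQUENCE_HEADER = 1
--     TEMPORAL_DELIMITER = 2
--     FRAME_HEADER = 3
--     TILE_GROUP = 4
--     METADATA = 5
--     FRAME = 6
--     REDUNDANT_FRAME_HEADER = 7
--     TILE_LIST = 8
--     RESERVED_1 = 9
--     RESERVED_2 = 10
--     RESERVED_3 = 11
--     RESERVED_4 = 12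
--     RESERVED_5 = 13
--     RESERVED_6 = 14
--     PADDING = 15
--
-- class AV1FrameType(IntEnum):
--     KEY_FRAME = 0
--     INTER_FRAME = 1
--     INTRA_ONLY_FRAME = 2
--     SWITCH_FRAME = 3
--
-- OBU_HEADER_BYTES = 1
--
-- def get_leb128(data, start_idx):
--     val = 0
--     size = 0
--     i = start_idx
--     while i < len(data):
--         byte = data[i]
--         val |= (byte & 0x7F) << (size * 7)
--         size += 1
--         i += 1
--         if byte & 0x80 == 0:
--             break
--     return val, size
--
-- def get_av1_obu_len(data, obu_start_idx):
--     assert data[obu_start_idx] & 0x80 == 0, "forbidden_zero_bit must be zero"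
--     assert data[obu_start_idx] & 0x02 != 0, "obu_has_size_field must be set"
--     length, size = get_leb128(data, obu_start_idx+1)
--     assert length > 0, "OBU length must be non-zero"
--     return length + size + OBU_HEADER_BYTES  # obu_size field doesn't count the header's length
--
-- def get_av1_obu_type(data, obu_start_idx):
--     return (data[obu_start_idx] & 0x78) >> 3
--
-- def get_av1_frame_type(data, obu_start_idx):
--     _, size = get_leb128(data, obu_start_idx+1)
--     return (data[obu_start_idx+1+size] & 0x60) >> 5
--
-- def get_av1_info(data):
--     i = 0
--     frame_info = []
--     prev_obu_type = None
--     prev_obu_offset = 0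
--     while i < len(data):
--         obu_len = get_av1_obu_len(data, i)
--         obu_type = get_av1_obu_type(data, i)
--         if obu_type == AV1OBUType.FRAME:
--             frame_type = get_av1_frame_type(data, i)
--             is_keyframe = frame_type == AV1FrameType.KEY_FRAME
--             offset = prev_obu_offset if prev_obu_type == AV1OBUType.SEQUENCE_HEADER else i
--             frame_info.append((obu_type, frame_type, is_keyframe, offset))
--         prev_obu_type = obu_type
--         prev_obu_offset = i
--         i += obu_len
--
--     return frame_info
-- ===== SOURCE B (Python) =====
-- from enum import Enum, IntEnum
--
-- class AV1OBUType(IntEnum):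
--     RESERVED_0 = 0
--     SEQUENCE_HEADER = 1
--     TEMPORAL_DELIMITER = 2
--     FRAME_HEADER = 3
--     TILE_GROUP = 4
--     METADATA = 5
--     FRAME = 6
--     REDUNDANT_FRAME_HEADER = 7
--     TILE_LIST = 8
--     RESERVED_1 = 9
--     RESERVED_2 = 10
--     RESERVED_3 = 11
--     RESERVED_4 = 12
--     RESERVED_5 = 13
--     RESERVED_6 = 14
--     PADDING = 15
--
-- class AV1FrameType(IntEnum):
--     KEY_FRAME = 0
--     INTER_FRAME = 1
--     INTRA_ONLY_FRAME = 2
--     SWITCH_FRAME = 3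
--
-- OBU_HEADER_BYTES = 1
--
-- def get_leb128(data, start_idx):
--     val = 0
--     size = 0
--     i = start_idx
--     while i < len(data):
--         byte = data[i]
--         val |= (byte & 0x7F) << (size * 7)
--         size += 1
--         i += 1
--         if byte & 0x80 == 0:
--             break
--     return val, size
--
-- def get_av1_obu_len(data, obu_start_idx):
--     assert data[obu_start_idx] & 0x80 == 0, "forbidden_zero_bit must be zero"
--     assert data[obu_start_idx] & 0x02 != 0, "obu_has_size_field must be set"
--     length, size = get_leb128(data, obu_start_idx+1)
--     assert length > 0, "OBU length must be non-zero"
--     return length + size + OBU_HEADER_BYTES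
--
-- def get_av1_obu_type(data, obu_start_idx):
--     return (data[obu_start_idx] & 0x78) >> 3
--
-- def get_av1_frame_type(data, obu_start_idx):
--     _, size = get_leb128(data, obu_start_idx+1)
--     return (data[obu_start_idx+1+size] & 0x60) >> 5
--
-- def get_av1_info(data):
--     # pass 1: index the stream -- every OBU as (offset, obu_type)
--     obus = []
--     i = 0
--     while i < len(data):
--         obu_len = get_av1_obu_len(data, i)
--         obus.append((i, get_av1_obu_type(data, i)))
--         i += obu_len
--     # pass 2: pair each OBU with its predecessor and emit the FRAME entries
--     prevs = [(None, 0)] + [(t, off) for off, t in obus]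
--     frame_info = []
--     for (prev_t, prev_off), (off, t) in zip(prevs, obus):
--         if t == AV1OBUType.FRAME:
--             ft = get_av1_frame_type(data, off)
--             offset = prev_off if prev_t == AV1OBUType.SEQUENCE_HEADER else off
--             frame_info.append((t, ft, ft == AV1FrameType.KEY_FRAME, offset))
--     return frame_info
-- ===== Notes on version B (the rewrite author's own statement) =====
-- stated objective: alternative
-- what changed: A's single fused loop carrying prev_obu_type/prev_obu_offset state is replaced by a two-phase pipeline: pass 1 indexes the stream into a list of (offset, obu_type) records, pass 2 zips that list with its None-prefixed shift to pair each OBU with its predecessor and emits the FRAME entries; frame-type parsing moves entirely into pass 2.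
import Mathlib
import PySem

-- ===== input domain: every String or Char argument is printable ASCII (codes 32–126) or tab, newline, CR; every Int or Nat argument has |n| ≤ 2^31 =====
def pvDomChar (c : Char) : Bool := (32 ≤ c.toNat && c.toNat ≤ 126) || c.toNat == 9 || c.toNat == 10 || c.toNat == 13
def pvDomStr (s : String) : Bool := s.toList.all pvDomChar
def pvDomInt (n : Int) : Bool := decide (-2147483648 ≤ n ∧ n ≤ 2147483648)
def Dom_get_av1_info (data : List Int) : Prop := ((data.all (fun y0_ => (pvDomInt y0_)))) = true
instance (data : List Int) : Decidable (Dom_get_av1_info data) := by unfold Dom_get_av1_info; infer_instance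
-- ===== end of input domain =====

-- B re-implements A as a two-phase pipeline (index the OBUs, then zip with the shifted list to emit
-- the FRAME entries); same output, same cost — objective: alternative decomposition.

-- ===== PORT A =====
-- shared helper: Python get_leb128's while-loop (val, size accumulator)
def lebAux (data : List Int) (i : Nat) (val : Int) (size : Nat) : Int × Nat :=
  if _h : i < data.length then
    let byte := data[i]
    let val' := PySem.Int.bor val ((PySem.Int.band byte 127) <<< (size * 7))
    let size' := size + 1
    if PySem.Int.band byte 128 == 0 then (val', size')
    else lebAux data (i + 1) val' size'
  else (val, size)
termination_by data.length - i

def get_leb128 (data : List Int) (start_idx : Nat) : Int × Nat :=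
  lebAux data start_idx 0 0

-- Python get_av1_obu_len; none = AssertionError/IndexError (those inputs are outside Pre_)
def get_av1_obu_len (data : List Int) (obu_start_idx : Nat) : Option Int :=
  match PySem.List.pyGet? data (obu_start_idx : Int) with
  | none => none
  | some b =>
    if PySem.Int.band b 128 == 0 then
      if PySem.Int.band b 2 != 0 then
        let ls := get_leb128 data (obu_start_idx + 1)
        if 0 < ls.1 then some (ls.1 + (ls.2 : Int) + 1) else none
      else none
    else none

-- Python get_av1_obu_type; every call site has obu_start_idx < data.length, so getD 0 is never taken
def get_av1_obu_type (data : List Int) (obu_start_idx : Nat) : Int :=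
  (PySem.Int.band ((PySem.List.pyGet? data (obu_start_idx : Int)).getD 0) 120) >>> 3

-- Python get_av1_frame_type; none = IndexError (outside Pre_)
def get_av1_frame_type (data : List Int) (obu_start_idx : Nat) : Option Int :=
  let ls := get_leb128 data (obu_start_idx + 1)
  (PySem.List.pyGet? data ((obu_start_idx : Int) + 1 + (ls.2 : Int))).map
    (fun fb => (PySem.Int.band fb 96) >>> 5)

-- termination helper for the walking loops (cited by decreasing_by)
theorem get_av1_obu_len_pos {data : List Int} {i : Nat} {l : Int}
    (h : get_av1_obu_len data i = some l) : 1 ≤ l := by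
  unfold get_av1_obu_len at h
  cases hg : PySem.List.pyGet? data (i : Int) with
  | none => rw [hg] at h; exact absurd h (by simp)
  | some b =>
    rw [hg] at h
    simp only [] at h
    split_ifs at h with h1 h2 h3
    · cases h; omega
  -- remaining cases are `none = some l`, closed by split_ifs automatically

-- A's fused while-loop: state (i, prev_obu_type, prev_obu_offset), appending FRAME entries
def loopA (data : List Int) (i : Nat) (prevT : Option Int) (prevOff : Int) :
    List (Int × Int × Bool × Int) :=
  if _h : i < data.length then
    match hol : get_av1_obu_len data i with
    | none => []           -- AssertionError in Python
    | some obu_len =>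
      let obu_type := get_av1_obu_type data i
      if obu_type == 6 then
        match get_av1_frame_type data i with
        | none => []       -- IndexError in Python
        | some frame_type =>
          let is_keyframe := frame_type == 0
          let offset : Int := if prevT == some 1 then prevOff else (i : Int)
          (obu_type, frame_type, is_keyframe, offset) ::
            loopA data (i + obu_len.toNat) (some obu_type) (i : Int)
      else loopA data (i + obu_len.toNat) (some obu_type) (i : Int)
  else []
termination_by data.length - i
decreasing_by all_goals (have := get_av1_obu_len_pos hol; omega)

def get_av1_info (data : List Int) : List (Int × Int × Bool × Int) :=
  loopA data 0 none 0

-- ===== PORT B =====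
-- pass 1: index the stream as a list of (offset, obu_type)
def pass1 (data : List Int) (i : Nat) : List (Int × Int) :=
  if _h : i < data.length then
    match hol : get_av1_obu_len data i with
    | none => []           -- AssertionError in Python
    | some obu_len => ((i : Int), get_av1_obu_type data i) :: pass1 data (i + obu_len.toNat)
  else []
termination_by data.length - i
decreasing_by all_goals (have := get_av1_obu_len_pos hol; omega)

-- pass 2 body: one zip element ((prev_t, prev_off), (off, t))
def stepB (data : List Int) (acc : List (Int × Int × Bool × Int))
    (pc : (Option Int × Int) × (Int × Int)) : List (Int × Int × Bool × Int) :=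
  let pt := pc.1.1
  let poff := pc.1.2
  let off := pc.2.1
  let t := pc.2.2
  if t == 6 then
    -- getD 0 is never taken under Pre_ (none would be Python's IndexError)
    let ft := (get_av1_frame_type data off.toNat).getD 0
    let offset := if pt == some 1 then poff else off
    acc ++ [(t, ft, ft == 0, offset)]
  else acc

def get_av1_info_alt (data : List Int) : List (Int × Int × Bool × Int) :=
  let obus := pass1 data 0
  let prevs : List (Option Int × Int) := (none, 0) :: obus.map (fun x => (some x.2, x.1))
  (List.zip prevs obus).foldl (stepB data) []

-- ===== PRECONDITION & SPEC =====
-- Pre_ = membership of data in the OBU-stream grammar, stated as a byte-level finite-state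
-- automaton (one state per parsing phase, a single foldl over the bytes): exactly the inputs on
-- which Python A returns (elsewhere A raises AssertionError or IndexError).
inductive PSt where
  | hdr : PSt                       -- expecting an OBU header byte
  | leb : Int → Int → Nat → PSt     -- inside the leb128 size field: obu_type, value, bytes read
  | frame : Nat → PSt               -- FRAME OBU: its first payload byte (frame header) must exist
  | skip : Nat → PSt                -- payload bytes still to pass over (≥ 1)
  | bad : PSt                       -- rejected
deriving DecidableEq, Repr

def pstStep : PSt → Int → PSt
  | .bad, _ => .bad
  | .hdr, b =>
      if PySem.Int.band b 128 == 0 && PySem.Int.band b 2 != 0 then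
        .leb ((PySem.Int.band b 120) >>> 3) 0 0
      else .bad
  | .leb t v s, y =>
      let v' := PySem.Int.bor v ((PySem.Int.band y 127) <<< (s * 7))
      if PySem.Int.band y 128 == 0 then
        if 0 < v' then (if t == 6 then .frame v'.toNat else .skip v'.toNat) else .bad
      else .leb t v' (s + 1)
  | .frame k, _ => if k == 1 then .hdr else .skip (k - 1)
  | .skip k, _ => if k == 1 then .hdr else .skip (k - 1)

def pstAccept : PSt → Bool
  | .hdr => true
  | .skip _ => true                       -- a truncated final payload is fine (the loop just exits)
  | .leb t v _ => 0 < v && t != 6         -- stream may end inside the size field iff size ≠ 0 and no frame byte is owed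
  | .frame _ => false                     -- a FRAME OBU whose frame-header byte is missing
  | .bad => false

def Pre_get_av1_info (data : List Int) : Prop :=
  pstAccept (data.foldl pstStep PSt.hdr) = true
instance (data : List Int) : Decidable (Pre_get_av1_info data) := by
  unfold Pre_get_av1_info; infer_instance

def pvWitness_get_av1_info : List Int := [10, 1, 0, 50, 1, 0]

def Spec_get_av1_info (data : List Int) (out : List (Int × Int × Bool × Int)) : Prop :=
  out = get_av1_info_alt data
instance (data : List Int) (out : List (Int × Int × Bool × Int)) :
    Decidable (Spec_get_av1_info data out) := by unfold Spec_get_av1_info; infer_instance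

-- ===== CLAIM (what is proved, stated in full; the proofs are below) =====
def Claim_equal_get_av1_info : Prop :=
  ∀ (data : List Int), Dom_get_av1_info data → Pre_get_av1_info data →
    Spec_get_av1_info data (get_av1_info data)

-- ===== LEMMAS AND PROOFS =====
-- proof helper: A's walk, one OBU at a time, as a validity recursion
def av1Valid (data : List Int) (i : Nat) : Bool :=
  if _h : i < data.length then
    match hol : get_av1_obu_len data i with
    | none => false
    | some obu_len =>
      (get_av1_obu_type data i != 6 || (get_av1_frame_type data i).isSome) &&
        av1Valid data (i + obu_len.toNat)
  else true
termination_by data.length - i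
decreasing_by all_goals (have := get_av1_obu_len_pos hol; omega)

-- the automaton run from byte position j in state st
def pvRun (data : List Int) (j : Nat) (st : PSt) : Bool :=
  pstAccept ((data.drop j).foldl pstStep st)

theorem pvRun_cons {data : List Int} {j : Nat} (st : PSt) (h : j < data.length) :
    pvRun data j st = pvRun data (j + 1) (pstStep st data[j]) := by
  unfold pvRun; rw [List.drop_eq_getElem_cons h]; rfl

theorem pvRun_end {data : List Int} {j : Nat} (st : PSt) (h : data.length ≤ j) :
    pvRun data j st = pstAccept st := by
  unfold pvRun; rw [List.drop_eq_nil_of_le h]; rfl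

theorem foldl_pstStep_bad (l : List Int) : l.foldl pstStep PSt.bad = PSt.bad := by
  induction l with
  | nil => rfl
  | cons x xs ih => simpa [pstStep] using ih

theorem pvRun_bad (data : List Int) (j : Nat) : pvRun data j PSt.bad = false := by
  unfold pvRun; rw [foldl_pstStep_bad]; rfl

theorem pvRun_skip (data : List Int) : ∀ (k j : Nat),
    pvRun data j (PSt.skip (k + 1)) = pvRun data (j + (k + 1)) PSt.hdr := by
  intro k
  induction k with
  | zero =>
    intro j
    by_cases h : j < data.length
    · rw [pvRun_cons _ h]; simp [pstStep]
    · rw [pvRun_end _ (by omega), pvRun_end _ (by omega)]; rfl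
  | succ n ih =>
    intro j
    by_cases h : j < data.length
    · rw [pvRun_cons _ h]
      have hs : pstStep (PSt.skip (n + 2)) data[j] = PSt.skip (n + 1) := by
        simp [pstStep]
      rw [hs, ih (j + 1)]
      congr 1
      omega
    · rw [pvRun_end _ (by omega), pvRun_end _ (by omega)]; rfl

theorem pvRun_frame (data : List Int) (k j : Nat) :
    pvRun data j (PSt.frame (k + 1)) =
      if j < data.length then pvRun data (j + (k + 1)) PSt.hdr else false := by
  by_cases h : j < data.length
  · rw [pvRun_cons _ h, if_pos h]
    cases k with
    | zero => simp [pstStep]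
    | succ n =>
      have hs : pstStep (PSt.frame (n + 2)) data[j] = PSt.skip (n + 1) := by
        simp [pstStep]
      rw [hs, pvRun_skip data n (j + 1)]
      congr 1
      omega
  · rw [pvRun_end _ (by omega), if_neg h]; rfl

theorem lebAux_size_le (data : List Int) (j : Nat) (v : Int) (s : Nat) :
    s ≤ (lebAux data j v s).2 := by
  rw [lebAux]
  by_cases h : j < data.length
  · simp only [h, dite_true]
    by_cases hy : PySem.Int.band data[j] 128 == 0
    · simp [hy]
    · have := lebAux_size_le data (j + 1)
        (PySem.Int.bor v ((PySem.Int.band data[j] 127) <<< (s * 7))) (s + 1)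
      simp only [hy, Bool.false_eq_true, if_false]
      omega
  · simp [h]
termination_by data.length - j

theorem pvRun_leb (data : List Int) (j : Nat) (t v : Int) (s : Nat) :
    pvRun data j (PSt.leb t v s) =
      (if 0 < (lebAux data j v s).1 then
        (if t == 6 then
          (if j + ((lebAux data j v s).2 - s) < data.length then
            pvRun data (j + ((lebAux data j v s).2 - s) + (lebAux data j v s).1.toNat) PSt.hdr
          else false)
        else pvRun data (j + ((lebAux data j v s).2 - s) + (lebAux data j v s).1.toNat) PSt.hdr)
      else false) := by
  rw [lebAux]
  by_cases h : j < data.length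
  · rw [pvRun_cons _ h]
    simp only [h, dite_true]
    by_cases hy : PySem.Int.band data[j] 128 == 0
    · -- terminator byte
      have hstep : pstStep (PSt.leb t v s) data[j] =
          (if 0 < PySem.Int.bor v ((PySem.Int.band data[j] 127) <<< (s * 7)) then
            (if t == 6 then
              PSt.frame (PySem.Int.bor v ((PySem.Int.band data[j] 127) <<< (s * 7))).toNat
            else PSt.skip (PySem.Int.bor v ((PySem.Int.band data[j] 127) <<< (s * 7))).toNat)
          else PSt.bad) := by
        simp [pstStep, hy]
      rw [hstep]
      simp only [hy, if_true]
      set v' := PySem.Int.bor v ((PySem.Int.band data[j] 127) <<< (s * 7)) with hv'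
      by_cases hpos : 0 < v'
      · simp only [hpos, if_true]
        have hk : v'.toNat = (v'.toNat - 1) + 1 := by omega
        by_cases ht : t == 6
        · simp only [ht, if_true]
          rw [hk, pvRun_frame]
          have e1 : j + (s + 1 - s) = j + 1 := by omega
          have e2 : j + 1 + (v'.toNat - 1 + 1) = j + (s + 1 - s) + v'.toNat := by omega
          rw [e1, e2, e1]
        · simp only [ht, Bool.false_eq_true, if_false]
          rw [hk, pvRun_skip]
          congr 1
          omega
      · simp only [hpos, if_false]
        exact pvRun_bad data (j + 1)
    · -- continuation byte
      have hstep : pstStep (PSt.leb t v s) data[j] =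
          PSt.leb t (PySem.Int.bor v ((PySem.Int.band data[j] 127) <<< (s * 7))) (s + 1) := by
        simp [pstStep, hy]
      rw [hstep]
      simp only [hy, Bool.false_eq_true, if_false]
      rw [pvRun_leb data (j + 1) t
        (PySem.Int.bor v ((PySem.Int.band data[j] 127) <<< (s * 7))) (s + 1)]
      have hsz := lebAux_size_le data (j + 1)
        (PySem.Int.bor v ((PySem.Int.band data[j] 127) <<< (s * 7))) (s + 1)
      set r := lebAux data (j + 1)
        (PySem.Int.bor v ((PySem.Int.band data[j] 127) <<< (s * 7))) (s + 1) with hr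
      have e : j + 1 + (r.2 - (s + 1)) = j + (r.2 - s) := by omega
      rw [e]
  · rw [pvRun_end _ (by omega)]
    simp only [h, dite_false]
    by_cases hv : 0 < v
    · by_cases ht : t == 6
      · have hacc : pstAccept (PSt.leb t v s) = false := by
          have ht' : t = 6 := by simpa using ht
          simp [pstAccept, ht']
        rw [hacc, if_pos hv, if_pos ht]
        rw [show ((((v, s) : Int × Nat)).2 - s) = 0 from Nat.sub_self s]
        rw [if_neg (by omega)]
      · have hrun : pvRun data (j + (((v, s) : Int × Nat).2 - s) + ((v, s) : Int × Nat).1.toNat)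
            PSt.hdr = true := by
          rw [pvRun_end _ (by omega)]; rfl
        simp only [pstAccept, hv, decide_true, Bool.true_and, ht, Bool.false_eq_true, if_false,
          hrun]
        simpa using ht
    · simp [pstAccept, hv]
termination_by data.length - j

theorem pvRun_hdr_eq_valid (data : List Int) (i : Nat) :
    pvRun data i PSt.hdr = av1Valid data i := by
  rw [av1Valid]
  by_cases h : i < data.length
  · simp only [h, dite_true]
    rw [pvRun_cons _ h]
    have hget : PySem.List.pyGet? data (i : Int) = some data[i] := by
      simp [PySem.List.pyGet?_natCast, List.getElem?_eq_getElem h]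
    by_cases hb : (PySem.Int.band data[i] 128 == 0 && PySem.Int.band data[i] 2 != 0)
    · have hstep : pstStep PSt.hdr data[i] =
          PSt.leb ((PySem.Int.band data[i] 120) >>> 3) 0 0 := by
        simp only [pstStep, hb, if_true]
      rw [Bool.and_eq_true] at hb
      obtain ⟨hb1, hb2⟩ := hb
      rcases hre : lebAux data (i + 1) 0 0 with ⟨val, sz⟩
      have holen : get_av1_obu_len data i = (if 0 < val then some (val + (sz : Int) + 1) else none) := by
        unfold get_av1_obu_len
        rw [hget]
        simp only [hb1, hb2, if_true]
        simp [get_leb128, hre]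
      have htype : get_av1_obu_type data i = (PySem.Int.band data[i] 120) >>> 3 := by
        unfold get_av1_obu_type
        rw [hget]
        rfl
      rw [hstep, pvRun_leb]
      simp only [hre]
      by_cases hpos : 0 < val
      · have hframe : (get_av1_frame_type data i).isSome = decide (i + 1 + sz < data.length) := by
          unfold get_av1_frame_type
          simp only [get_leb128, hre]
          rw [Option.isSome_map]
          have e : ((i : Int) + 1 + (sz : Int)) = ((i + 1 + sz : Nat) : Int) := by push_cast; ring
          rw [e, PySem.List.pyGet?_natCast]
          by_cases hp : i + 1 + sz < data.length
          · simp [hp]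
          · simp [hp]
        cases hx : get_av1_obu_len data i with
        | none =>
          rw [holen, if_pos hpos] at hx
          exact absurd hx (by simp)
        | some l =>
          rw [holen, if_pos hpos] at hx
          have hl : l = val + (sz : Int) + 1 := (Option.some.inj hx).symm
          subst hl
          have hnext : i + 1 + (sz - 0) + val.toNat = i + (val + (sz : Int) + 1).toNat := by
            omega
          have hih : pvRun data (i + (val + (sz : Int) + 1).toNat) PSt.hdr =
              av1Valid data (i + (val + (sz : Int) + 1).toNat) :=
            pvRun_hdr_eq_valid data (i + (val + (sz : Int) + 1).toNat)
          simp only [hpos, if_true, hnext, hih, htype]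
          by_cases ht : ((PySem.Int.band data[i] 120) >>> 3 : Int) == 6
          · have ht' : (((PySem.Int.band data[i] 120) >>> 3 : Int) != 6) = false := by
              simpa using ht
            simp only [ht, if_true, ht', hframe, Bool.false_or]
            by_cases hp : i + 1 + sz < data.length
            · simp [hp]
            · have hbig : av1Valid data (i + (val + (sz : Int) + 1).toNat) = true := by
                rw [av1Valid]
                have : ¬ (i + (val + (sz : Int) + 1).toNat < data.length) := by omega
                simp [this]
              simp [hp, hbig]
          · have ht' : (((PySem.Int.band data[i] 120) >>> 3 : Int) != 6) = true := by
              simpa using ht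
            simp [ht, ht']
      · cases hx : get_av1_obu_len data i with
        | none => simp [hpos]
        | some l =>
          rw [holen, if_neg hpos] at hx
          exact absurd hx (by simp)
    · have hstep : pstStep PSt.hdr data[i] = PSt.bad := by
        simp only [pstStep]
        rw [if_neg]
        simpa using hb
      have holen : get_av1_obu_len data i = none := by
        unfold get_av1_obu_len
        rw [hget]
        cases h1 : (PySem.Int.band data[i] 128 == 0) with
        | false => simp [h1]
        | true =>
          cases h2 : (PySem.Int.band data[i] 2 != 0) with
          | false => simp [h1, h2]
          | true => exact absurd (by rw [h1, h2]; rfl) hb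
      rw [hstep, pvRun_bad]
      cases hx : get_av1_obu_len data i with
      | none => rfl
      | some l =>
        rw [holen] at hx
        exact absurd hx (by simp)
  · rw [pvRun_end _ (by omega)]
    simp [h, pstAccept]
termination_by data.length - i
decreasing_by have hsz := lebAux_size_le data (i + 1) 0 0; rw [hre] at hsz; omega

-- the second pass, read as a recursion with the predecessor carried along
def scanB (data : List Int) : (Option Int × Int) → List (Int × Int) →
    List (Int × Int × Bool × Int)
  | _, [] => []
  | p, (off, t) :: rest =>
    (if t == 6 then
      let ft := (get_av1_frame_type data off.toNat).getD 0
      [(t, ft, ft == 0, if p.1 == some 1 then p.2 else off)]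
     else []) ++ scanB data (some t, off) rest

theorem foldl_zip_scanB (data : List Int) (l : List (Int × Int)) :
    ∀ (p : Option Int × Int) (acc : List (Int × Int × Bool × Int)),
    (List.zip (p :: l.map (fun x => (some x.2, x.1))) l).foldl (stepB data) acc =
      acc ++ scanB data p l := by
  induction l with
  | nil => intro p acc; simp [scanB]
  | cons hd tl ih =>
    intro p acc
    obtain ⟨off, t⟩ := hd
    simp only [List.map_cons, List.zip_cons_cons, List.foldl_cons]
    rw [ih]
    by_cases ht : t == 6
    · simp [scanB, stepB, ht]
    · simp [scanB, stepB, ht]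

theorem loopA_eq_scanB (data : List Int) (i : Nat) (pt : Option Int) (po : Int)
    (hv : av1Valid data i = true) :
    loopA data i pt po = scanB data (pt, po) (pass1 data i) := by
  rw [loopA, pass1, av1Valid] at *
  by_cases h : i < data.length
  · simp only [h, dite_true] at hv ⊢
    split at hv
    · exact absurd hv (by simp)
    · rename_i obu_len hol
      rw [Bool.and_eq_true] at hv
      obtain ⟨hg, hv'⟩ := hv
      have ih := loopA_eq_scanB data (i + obu_len.toNat) (some (get_av1_obu_type data i)) (i : Int) hv'
      by_cases ht : get_av1_obu_type data i == 6
      · have hteq : get_av1_obu_type data i = 6 := by simpa using ht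
        have hns : (get_av1_frame_type data i).isSome := by
          rcases Bool.or_eq_true .. |>.mp hg with h1 | h1
          · exact absurd ht (by simpa using h1)
          · exact h1
        cases hft : get_av1_frame_type data i with
        | none => rw [hft] at hns; exact absurd hns (by simp)
        | some ft =>
          rw [hteq] at ih
          simp [scanB, hft, hteq, ih]
      · have hteq : (get_av1_obu_type data i == 6) = false := by simpa using ht
        simp [scanB, hteq, ih]
  · simp only [h, dite_false] at hv ⊢
    simp [scanB]
termination_by data.length - i
decreasing_by all_goals (rename_i hA hB hC; have := get_av1_obu_len_pos hC; omega)

-- ===== VERDICT (by name: the statement is the Claim_ definition above) =====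
theorem get_av1_info_spec : Claim_equal_get_av1_info := by
  intro data _hdom hpre
  unfold Spec_get_av1_info get_av1_info get_av1_info_alt
  rw [foldl_zip_scanB]
  have hv : av1Valid data 0 = true := by
    rw [← pvRun_hdr_eq_valid]
    unfold Pre_get_av1_info at hpre
    simpa [pvRun] using hpre
  simpa using loopA_eq_scanB data 0 none 0 hv
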